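-- pv_equiv track=rewrite | github.com/Wen-wsf/AIGO-recommendation | 自然語言處理商品名稱/NER3.PY | mark_brands
-- ===== SOURCE A (Python) =====
-- def mark_brands(text, brands):
--     words = text.split()
--     tags = ["O"] * len(words)  # 初始化所有词的标签为"O"（Outside）
--
--     for brand in brands:
--         brand_words = brand.split()
--         brand_length = len(brand_words)
--
--         for i in range(len(words)):
--             if words[i:i+brand_length] == brand_words:
--                 tags[i] = "B"  # 当找到公司名的开始时，将第一个词标记为"B"（Begin）
--                 if brand_length > 1:
--                     tags[i+1:i+brand_length] = ["I"] * (brand_length - 1)  # 标记公司名的中间词为"I"（Inside）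
--
--     return tags
-- ===== SOURCE B (Python) =====
-- def mark_brands(text, brands):
--     words = text.split()
--     phrases = [b.split() for b in brands]
--
--     # index the brand phrases by their first word
--     index = {}
--     for o, bw in enumerate(phrases):
--         if bw:
--             index.setdefault(bw[0], []).append((o, bw))
--
--     # one pass over the text: bucket every match by brand
--     hits = [[] for _ in phrases]
--     for i, w in enumerate(words):
--         for o, bw in index.get(w, []):
--             if words[i:i + len(bw)] == bw:
--                 hits[o].append((i, len(bw)))
--
--     # tag the matches, brand by brand
--     tags = ["O"] * len(words)
--     for hs in hits:
--         for i, L in hs: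
--             tags[i] = "B"
--             tags[i + 1:i + L] = ["I"] * (L - 1)
--     return tags
-- ===== Notes on version B (the rewrite author's own statement) =====
-- stated objective: alternative
-- what changed: B indexes brand phrases by their first word, finds all matches in one pass over the text and then applies them brand by brand, instead of A's scan of every text position for every brand.
-- intended difference: On a nonempty text with a whitespace-only brand, A tags every word 'B' (the empty phrase matches at every position); B ignores brands with no words and tags only real matches, the intended behaviour. — e.g. on mark_brands("a", [""]): A returns ["B"], B returns ["O"]
import Mathlib
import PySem

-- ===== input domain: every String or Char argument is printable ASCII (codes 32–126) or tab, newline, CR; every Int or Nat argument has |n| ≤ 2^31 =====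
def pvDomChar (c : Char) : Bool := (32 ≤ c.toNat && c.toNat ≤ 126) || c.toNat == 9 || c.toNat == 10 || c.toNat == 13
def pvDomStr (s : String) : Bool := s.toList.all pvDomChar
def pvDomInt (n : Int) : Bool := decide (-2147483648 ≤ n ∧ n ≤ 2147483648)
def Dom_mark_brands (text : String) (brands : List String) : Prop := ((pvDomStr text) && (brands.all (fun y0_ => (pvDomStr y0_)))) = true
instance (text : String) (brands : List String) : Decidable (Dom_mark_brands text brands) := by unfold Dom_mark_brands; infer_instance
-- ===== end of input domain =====

-- B indexes the brand phrases by first word, finds every match in ONE pass over the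
-- text and applies them brand by brand, instead of A's scan of every position for
-- every brand; objective: alternative.

-- ===== PORT A =====

-- words[i:i+len(bw)] == bw, the comparison A makes
def mbMatch (words bw : List String) (i : Nat) : Bool :=
  PySem.List.slice words (some (i : Int)) (some ((i : Int) + (bw.length : Int))) == bw

-- body of A's inner loop (for i in range(len(words)): overwrite tags at a match)
def mbInnerStep (words bw : List String) (tags : List String) (i : Nat) : List String :=
  if mbMatch words bw i then
    if bw.length > 1 then
      (tags.set i "B").take (i + 1) ++ List.replicate (bw.length - 1) "I" ++ (tags.set i "B").drop (i + bw.length)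
    else tags.set i "B"
  else tags

def mark_brands (text : String) (brands : List String) : List String :=
  let words := PySem.Str.split₀ text
  brands.foldl
    (fun tags brand => (List.range words.length).foldl (mbInnerStep words (PySem.Str.split₀ brand)) tags)
    (List.replicate words.length "O")

-- ===== PORT B =====

-- Python's enumerate(xs) (indices are nonnegative; ported with Nat counters, exact)
def mbEnum {α : Type} : List α → Nat → List (Nat × α)
  | [], _ => []
  | x :: xs, k => (k, x) :: mbEnum xs (k + 1)

-- index.setdefault(bw[0], []).append((o, bw)) for the nonempty phrases
def mbIndex (phrases : List (List String)) : PySem.Dict String (List (Nat × List String)) :=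
  (mbEnum phrases 0).foldl
    (fun d ob =>
      match ob.2 with
      | [] => d
      | w :: _ => d.modify w [] (· ++ [ob]))
    PySem.Dict.empty

-- body of the bucket loop: hits[o].append((i, len(bw))) at a match
def mbInnerB (words : List String) (i : Nat) (hits : List (List (Nat × Nat)))
    (ob : Nat × List String) : List (List (Nat × Nat)) :=
  if mbMatch words ob.2 i then hits.set ob.1 ((hits.getD ob.1 []) ++ [(i, ob.2.length)])
  else hits

-- the one pass over the words
def mbCollect (words : List String) (phrases : List (List String))
    (idx : PySem.Dict String (List (Nat × List String))) : List (List (Nat × Nat)) :=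
  (mbEnum words 0).foldl
    (fun hits iw => (idx.getD iw.2 []).foldl (mbInnerB words iw.1) hits)
    (phrases.map (fun _ => []))

-- tags[i] = "B"; tags[i+1:i+L] = ["I"]*(L-1)  (slice assignment, exact for the
-- nonnegative in-order bounds every recorded match has: L ≥ 1, i+L ≤ len)
def mbWrite (tags : List String) (i L : Nat) : List String :=
  (tags.set i "B").take (i + 1) ++ List.replicate (L - 1) "I" ++ (tags.set i "B").drop (i + L)

def mark_brands_alt (text : String) (brands : List String) : List String :=
  let words := PySem.Str.split₀ text
  let phrases := brands.map PySem.Str.split₀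
  let hits := mbCollect words phrases (mbIndex phrases)
  hits.foldl (fun tags hs => hs.foldl (fun tags il => mbWrite tags il.1 il.2) tags)
    (List.replicate words.length "O")

-- ===== PRECONDITION & SPEC =====

-- On a nonempty text with a whitespace-only brand, A tags EVERY word "B" (the empty
-- phrase "matches" at every position); B ignores a brand with no words, the intended
-- behaviour for a brand tagger.
def D_mark_brands (text : String) (brands : List String) : Prop :=
  PySem.Str.split₀ text ≠ [] ∧ ∃ b ∈ brands, PySem.Str.split₀ b = []
instance (text : String) (brands : List String) : Decidable (D_mark_brands text brands) := by
  unfold D_mark_brands; infer_instance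

def Spec_mark_brands (text : String) (brands : List String) (out : List String) : Prop :=
  ¬ D_mark_brands text brands → out = mark_brands_alt text brands
instance (text : String) (brands : List String) (out : List String) : Decidable (Spec_mark_brands text brands out) := by unfold Spec_mark_brands; infer_instance

def pvDiffWitness_mark_brands : String × List String := ("a", [""])
def pvDiffWitnessOut_mark_brands : (List String) × (List String) := (["B"], ["O"])

-- ===== CLAIM (what is proved, stated in full; the proofs are below) =====
def Claim_unchanged_mark_brands : Prop := ∀ (text : String) (brands : List String), Dom_mark_brands text brands → Spec_mark_brands text brands (mark_brands text brands)
def Claim_changed_mark_brands : Prop := Dom_mark_brands (pvDiffWitness_mark_brands.1) (pvDiffWitness_mark_brands.2) ∧ D_mark_brands (pvDiffWitness_mark_brands.1) (pvDiffWitness_mark_brands.2) ∧ mark_brands (pvDiffWitness_mark_brands.1) (pvDiffWitness_mark_brands.2) = pvDiffWitnessOut_mark_brands.1 ∧ mark_brands_alt (pvDiffWitness_mark_brands.1) (pvDiffWitness_mark_brands.2) = pvDiffWitnessOut_mark_brands.2 ∧ pvDiffWitnessOut_mark_brands.1 ≠ pvDiffWitnessOut_mark_brands.2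

-- ===== LEMMAS AND PROOFS =====

-- the matches of one phrase, in A's inner-loop order
def mbHitsOf (words bw : List String) : List (Nat × Nat) :=
  ((List.range words.length).filter (fun i => mbMatch words bw i)).map (fun i => (i, bw.length))

theorem mbMatch_eq (words bw : List String) (i : Nat) :
    mbMatch words bw i = ((words.drop i).take bw.length == bw) := by
  simp [mbMatch, PySem.List.slice_natCast_add]

-- A's write at a match of a NONEMPTY phrase is exactly B's slice-assignment write
theorem mbInnerStep_eq_mbWrite (words bw : List String) (hbw : bw ≠ []) (tags : List String) (i : Nat)
    (h : mbMatch words bw i = true) :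
    mbInnerStep words bw tags i = mbWrite tags i bw.length := by
  unfold mbInnerStep mbWrite
  rw [if_pos h]
  by_cases hL : bw.length > 1
  · rw [if_pos hL]
  · have h1 : bw.length = 1 := by
      have := List.length_pos_of_ne_nil hbw; omega
    rw [if_neg hL, h1]
    simp

-- A's inner loop = folding B's write over the phrase's hit list (nonempty phrase)
theorem mbInner_eq_hits (words bw : List String) (hbw : bw ≠ []) (tags : List String) :
    (List.range words.length).foldl (mbInnerStep words bw) tags
      = (mbHitsOf words bw).foldl (fun t il => mbWrite t il.1 il.2) tags := by
  unfold mbHitsOf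
  rw [List.foldl_map]
  have h1 : (List.range words.length).foldl (mbInnerStep words bw) tags
      = (List.range words.length).foldl
          (fun t i => if mbMatch words bw i then mbInnerStep words bw t i else t) tags := by
    apply PySem.List.foldl_congr_mem
    intro acc i _
    by_cases h : mbMatch words bw i = true
    · rw [if_pos h]
    · rw [if_neg h]
      unfold mbInnerStep
      rw [if_neg h]
  rw [h1, PySem.List.foldl_if_eq_foldl_filter]
  apply PySem.List.foldl_congr_mem
  intro acc i hi
  exact mbInnerStep_eq_mbWrite words bw hbw acc i (List.of_mem_filter hi)

-- membership in mbEnum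
theorem mem_mbEnum {α : Type} (xs : List α) (s : Nat) (p : Nat × α) :
    p ∈ mbEnum xs s ↔ ∃ k, ∃ h : k < xs.length, p = (s + k, xs[k]) := by
  induction xs generalizing s with
  | nil => simp [mbEnum]
  | cons x xs ih =>
    simp only [mbEnum, List.mem_cons, ih]
    constructor
    · rintro (rfl | ⟨k, h, rfl⟩)
      · exact ⟨0, by simp, by simp⟩
      · refine ⟨k + 1, by simpa using h, ?_⟩
        simp [Nat.add_assoc, Nat.add_comm 1 k]
    · rintro ⟨k, h, rfl⟩
      cases k with
      | zero => left; simp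
      | succ k =>
        right
        refine ⟨k, by simpa using h, ?_⟩
        simp [Nat.add_assoc, Nat.add_comm 1 k]

theorem pairwise_mbEnum {α : Type} (xs : List α) (s : Nat) :
    (mbEnum xs s).Pairwise (fun a b => a.1 < b.1) := by
  induction xs generalizing s with
  | nil => exact List.Pairwise.nil
  | cons x xs ih =>
    refine List.Pairwise.cons (fun q hq => ?_) (ih (s + 1))
    obtain ⟨k, hk, rfl⟩ := (mem_mbEnum xs (s + 1) q).mp hq
    omega

-- the index groups the (nonempty-phrase) entries by first word
theorem mbIndex_getD (phrases : List (List String)) (hall : ∀ bw ∈ phrases, bw ≠ []) (w : String) :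
    (mbIndex phrases).getD w [] = (mbEnum phrases 0).filter (fun ob => ob.2.headI == w) := by
  unfold mbIndex
  have hmem : ∀ ob ∈ mbEnum phrases 0, ob.2 ≠ [] := by
    intro ob hob
    obtain ⟨k, hk, rfl⟩ := (mem_mbEnum _ _ _).mp hob
    exact hall _ (List.getElem_mem hk)
  have hcong := PySem.List.foldl_congr_mem
    (l := mbEnum phrases 0) (init := (PySem.Dict.empty : PySem.Dict String (List (Nat × List String))))
    (f := fun d ob =>
      match ob.2 with
      | [] => d
      | w' :: _ => d.modify w' [] (· ++ [ob]))
    (g := fun d ob => d.modify ob.2.headI [] (· ++ [ob]))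
    (by
      intro acc ob hob
      cases hbw : ob.2 with
      | nil => exact absurd hbw (hmem ob hob)
      | cons w' t => simp [hbw])
  rw [hcong]
  have hmap : (mbEnum phrases 0).foldl (fun d ob => d.modify ob.2.headI [] (· ++ [ob])) PySem.Dict.empty
      = ((mbEnum phrases 0).map (fun ob => (ob.2.headI, ob))).foldl
          (fun d p => d.modify p.1 [] (· ++ [p.2])) PySem.Dict.empty := by
    rw [List.foldl_map]
  rw [hmap, PySem.Dict.getD_foldl_modify_append, PySem.Dict.getD_empty]
  rw [List.filter_map, List.map_map]
  simp [Function.comp_def]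

-- a match of a nonempty phrase pins the word under its start
theorem mbMatch_headI (words bw : List String) (hbw : bw ≠ []) (i : Nat)
    (h : mbMatch words bw i = true) : words[i]? = some bw.headI := by
  rw [mbMatch_eq] at h
  obtain ⟨w, bw', rfl⟩ : ∃ w bw', bw = w :: bw' := by
    cases bw with
    | nil => exact absurd rfl hbw
    | cons w bw' => exact ⟨w, bw', rfl⟩
  have h' : (words.drop i).take (w :: bw').length = w :: bw' := by simpa using h
  have hh : (words.drop i).head? = some w := by
    cases hd : words.drop i with
    | nil => rw [hd] at h'; simp at h'
    | cons y ys =>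
      rw [hd] at h'
      simp [List.take_succ_cons] at h'
      simp [h'.1]
  rw [← List.head?_drop]
  simpa using hh


-- appending to one bucket, seen through getElem?
theorem mbSet_append_get (H : List (List (Nat × Nat))) (o : Nat) (x : List (Nat × Nat)) :
    (H.set o (H.getD o [] ++ x))[o]? = H[o]?.map (· ++ x) := by
  by_cases h : o < H.length
  · rw [List.getElem?_set_self (by simpa using h)]
    rw [List.getD_eq_getElem?_getD, List.getElem?_eq_getElem h]
    simp
  · rw [List.set_eq_of_length_le (by omega), List.getElem?_eq_none (by omega)]
    simp

-- a bucket pass never touches a component no bucket entry names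
theorem mbBucket_untouched (words : List String) (i : Nat) :
    ∀ (bs : List (Nat × List String)) (H : List (List (Nat × Nat))) (o : Nat),
      (∀ ob ∈ bs, ob.1 ≠ o) →
      (bs.foldl (mbInnerB words i) H)[o]? = H[o]? := by
  intro bs
  induction bs with
  | nil => intro H o _; rfl
  | cons ob bs ih =>
    intro H o hno
    rw [List.foldl_cons, ih _ o (fun q hq => hno q (List.mem_cons_of_mem _ hq))]
    unfold mbInnerB
    by_cases h : mbMatch words ob.2 i = true
    · rw [if_pos h, List.getElem?_set_ne (hno ob List.mem_cons_self)]
    · rw [if_neg h]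

-- two entries of a fst-distinct list with the same fst are the same entry
theorem mbFst_unique {bs : List (Nat × List String)}
    (hdist : bs.Pairwise (fun a b => a.1 ≠ b.1)) :
    ∀ x ∈ bs, ∀ y ∈ bs, x.1 = y.1 → x = y := by
  induction bs with
  | nil => intro x hx; simp at hx
  | cons b bs ih =>
    intro x hx y hy hxy
    rcases List.mem_cons.mp hx with rfl | hx' <;> rcases List.mem_cons.mp hy with rfl | hy'
    · rfl
    · exact absurd hxy ((List.pairwise_cons.mp hdist).1 y hy')
    · exact absurd hxy.symm ((List.pairwise_cons.mp hdist).1 x hx')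
    · exact ih (List.pairwise_cons.mp hdist).2 x hx' y hy' hxy

theorem mbFind_of_mem {bs : List (Nat × List String)}
    (hdist : bs.Pairwise (fun a b => a.1 ≠ b.1)) {ob : Nat × List String}
    (hmem : ob ∈ bs) : bs.find? (fun q => q.1 == ob.1) = some ob := by
  cases hf : bs.find? (fun q => q.1 == ob.1) with
  | none =>
    have := List.find?_eq_none.mp hf ob hmem
    simp at this
  | some q =>
    have hq1 : q.1 = ob.1 := by simpa using List.find?_some hf
    have := mbFst_unique hdist q (List.mem_of_find?_eq_some hf) ob hmem hq1
    rw [this]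

-- pointwise value of one bucket pass (fst-distinct bucket)
theorem mbBucket_get (words : List String) (i : Nat) :
    ∀ (bs : List (Nat × List String)) (H : List (List (Nat × Nat))) (o : Nat),
      bs.Pairwise (fun a b => a.1 ≠ b.1) →
      (bs.foldl (mbInnerB words i) H)[o]? =
        match bs.find? (fun ob => ob.1 == o) with
        | some ob =>
            if mbMatch words ob.2 i then H[o]?.map (· ++ [(i, ob.2.length)]) else H[o]?
        | none => H[o]? := by
  intro bs
  induction bs with
  | nil => intro H o _; rfl
  | cons ob bs ih =>
    intro H o hdist
    rw [List.foldl_cons]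
    by_cases hob : ob.1 = o
    · rw [List.find?_cons_of_pos (by simpa using hob)]
      have hrest : ∀ q ∈ bs, q.1 ≠ o := by
        intro q hq
        have := (List.pairwise_cons.mp hdist).1 q hq
        omega
      rw [mbBucket_untouched words i bs _ o hrest]
      unfold mbInnerB
      by_cases h : mbMatch words ob.2 i = true
      · rw [if_pos h, hob, mbSet_append_get]
        simp [h]
      · rw [if_neg h]
        simp [h]
    · rw [List.find?_cons_of_neg (by simpa using hob)]
      have hstep : (mbInnerB words i H ob)[o]? = H[o]? := by
        unfold mbInnerB
        by_cases h : mbMatch words ob.2 i = true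
        · rw [if_pos h, List.getElem?_set_ne hob]
        · rw [if_neg h]
      rw [ih _ o (List.pairwise_cons.mp hdist).2]
      cases bs.find? (fun q => q.1 == o) with
      | none => exact hstep
      | some q => simp only [hstep]

-- one word of the pass, on a uniformly described state
theorem mbWordStep (words : List String) (phrases : List (List String))
    (hall : ∀ bw ∈ phrases, bw ≠ []) (i : Nat) (w : String) (hw : words[i]? = some w)
    (g : List String → List (Nat × Nat)) :
    ((mbEnum phrases 0).filter (fun ob => ob.2.headI == w)).foldl (mbInnerB words i)
        (phrases.map g)
      = phrases.map (fun bw =>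
          if mbMatch words bw i then g bw ++ [(i, bw.length)] else g bw) := by
  have hdist : ((mbEnum phrases 0).filter (fun ob => ob.2.headI == w)).Pairwise
      (fun a b => a.1 ≠ b.1) := by
    refine List.Pairwise.filter _ ?_
    exact (pairwise_mbEnum phrases 0).imp (by intro a b h; omega)
  apply List.ext_getElem?
  intro o
  rw [mbBucket_get words i _ _ o hdist]
  by_cases ho : o < phrases.length
  · have hHo : (phrases.map g)[o]? = some (g phrases[o]) := by
      simp [List.getElem?_eq_getElem ho]
    have hRo : (phrases.map (fun bw =>
        if mbMatch words bw i then g bw ++ [(i, bw.length)] else g bw))[o]? =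
        some (if mbMatch words phrases[o] i then g phrases[o] ++ [(i, phrases[o].length)]
              else g phrases[o]) := by
      simp [List.getElem?_eq_getElem ho]
    by_cases hh : phrases[o].headI == w
    · have hmem : ((o : Nat), phrases[o]) ∈
          (mbEnum phrases 0).filter (fun ob => ob.2.headI == w) := by
        rw [List.mem_filter]
        exact ⟨(mem_mbEnum phrases 0 _).mpr ⟨o, ho, by simp⟩, hh⟩
      rw [show ((mbEnum phrases 0).filter (fun ob => ob.2.headI == w)).find?
            (fun ob => ob.1 == o) = some (o, phrases[o]) from mbFind_of_mem hdist hmem]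
      rw [hHo, hRo]
      by_cases h : mbMatch words phrases[o] i = true
      · rw [if_pos h]
        simp [h]
      · rw [if_neg h]
        simp [h]
    · have hfind : ((mbEnum phrases 0).filter (fun ob => ob.2.headI == w)).find?
          (fun ob => ob.1 == o) = none := by
        rw [List.find?_eq_none]
        intro q hq
        rcases List.mem_filter.mp hq with ⟨hq1, hq2⟩
        obtain ⟨k, hk, rfl⟩ := (mem_mbEnum phrases 0 q).mp hq1
        simp only [Nat.zero_add] at hq2 ⊢
        intro hko
        have : k = o := by simpa using hko
        subst this
        exact hh hq2
      rw [hfind, hHo, hRo]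
      have hnm : mbMatch words phrases[o] i ≠ true := by
        intro h
        have h2 := mbMatch_headI words phrases[o] (hall _ (List.getElem_mem ho)) i h
        rw [hw] at h2
        have h3 : w = phrases[o].headI := Option.some.inj h2
        exact hh (by simp [h3])
      rw [if_neg hnm]
  · have h1 : (phrases.map g)[o]? = none := by
      rw [List.getElem?_eq_none]; simpa using (by omega : phrases.length ≤ o)
    have h2 : (phrases.map (fun bw =>
        if mbMatch words bw i then g bw ++ [(i, bw.length)] else g bw))[o]? = none := by
      rw [List.getElem?_eq_none]; simpa using (by omega : phrases.length ≤ o)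
    have hfind : ((mbEnum phrases 0).filter (fun ob => ob.2.headI == w)).find?
        (fun ob => ob.1 == o) = none := by
      rw [List.find?_eq_none]
      intro q hq
      obtain ⟨k, hk, rfl⟩ := (mem_mbEnum phrases 0 q).mp (List.mem_filter.mp hq).1
      simp only [Nat.zero_add]
      intro hko
      have : k = o := by simpa using hko
      omega
    rw [hfind, h1, h2]

-- the whole pass, from any suffix of the word list
theorem mbPass (words : List String) (phrases : List (List String))
    (hall : ∀ bw ∈ phrases, bw ≠ []) :
    ∀ (ws : List String) (s : Nat), ws = words.drop s →
      ∀ (g : List String → List (Nat × Nat)),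
      (mbEnum ws s).foldl
          (fun hits iw => ((mbIndex phrases).getD iw.2 []).foldl (mbInnerB words iw.1) hits)
          (phrases.map g)
        = phrases.map (fun bw =>
            g bw ++ ((List.range' s ws.length).filter (fun i => mbMatch words bw i)).map
              (fun i => (i, bw.length))) := by
  intro ws
  induction ws with
  | nil => intro s _ g; simp [mbEnum]
  | cons wd rest ih =>
    intro s hws g
    have hwd : words[s]? = some wd := by rw [← List.head?_drop, ← hws]; rfl
    have hrest : rest = words.drop (s + 1) := by
      rw [← List.drop_drop, ← hws]; rfl
    rw [show mbEnum (wd :: rest) s = (s, wd) :: mbEnum rest (s + 1) from rfl, List.foldl_cons]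
    rw [mbIndex_getD phrases hall wd]
    rw [mbWordStep words phrases hall s wd hwd g]
    rw [ih (s + 1) hrest _]
    apply List.map_congr_left
    intro bw _
    rw [show (wd :: rest).length = rest.length + 1 from rfl, List.range'_succ, List.filter_cons]
    by_cases h : mbMatch words bw s = true
    · simp [h, List.append_assoc]
    · simp [h]

-- B's one pass computes every phrase's hit list
theorem mbCollect_eq (words : List String) (phrases : List (List String))
    (hall : ∀ bw ∈ phrases, bw ≠ []) :
    mbCollect words phrases (mbIndex phrases) = phrases.map (fun bw => mbHitsOf words bw) := by
  unfold mbCollect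
  rw [mbPass words phrases hall words 0 (by simp) (fun _ => [])]
  apply List.map_congr_left
  intro bw _
  rw [mbHitsOf, ← List.range_eq_range']
  simp

-- ===== VERDICT (by name: the statement is the Claim_ definition above) =====
theorem mark_brands_spec : Claim_unchanged_mark_brands := by
  intro text brands _
  unfold Spec_mark_brands
  intro hnd
  simp only [mark_brands, mark_brands_alt]
  set words := PySem.Str.split₀ text with hwords
  by_cases hw : words = []
  · rw [hw]
    simp [mbCollect, mbEnum, List.foldl_map]
  · have hall : ∀ bw ∈ brands.map PySem.Str.split₀, bw ≠ [] := by
      intro bw hbw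
      obtain ⟨b, hb, rfl⟩ := List.mem_map.mp hbw
      intro hnil
      exact hnd ⟨hw, b, hb, hnil⟩
    rw [mbCollect_eq words _ hall, List.foldl_map]
    have hA : brands.foldl
        (fun tags brand => (List.range words.length).foldl (mbInnerStep words (PySem.Str.split₀ brand)) tags)
        (List.replicate words.length "O")
        = (brands.map PySem.Str.split₀).foldl
            (fun tags bw => (List.range words.length).foldl (mbInnerStep words bw) tags)
            (List.replicate words.length "O") := by
      rw [List.foldl_map]
    rw [hA]
    apply PySem.List.foldl_congr_mem
    intro acc bw hbw
    exact mbInner_eq_hits words bw (hall bw hbw) acc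

theorem mark_brands_changed : Claim_changed_mark_brands := by
  unfold Claim_changed_mark_brands; decide
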